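-- pv_equiv track=rewrite | github.com/ALauraFM/barcode_detector | src/barcode_reader.py | findparallel
-- ===== SOURCE A (Python) =====
-- def findparallel(lines):
--     lines1 = []
--     for i in range(len(lines)):
--         for j in range(len(lines)):
--             if i == j:
--                 continue
--             if abs(lines[i][0][1] - lines[j][0][1]) == 0:
--                 lines1.append((i, j))
--     return len(lines1)
-- ===== SOURCE B (Python) =====
-- def findparallel(lines):
--     counts = {}
--     for line in lines:
--         a = line[0][1]
--         counts[a] = counts.get(a, 0) + 1
--     return sum(c * (c - 1) for c in counts.values())
-- ===== Notes on version B (the rewrite author's own statement) =====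
-- stated objective: faster
-- what changed: Replaces the O(n^2) double loop over index pairs by a single pass that counts occurrences of each angle in a dict and returns sum c*(c-1) over the counts.
-- outside the precondition, e.g. on findparallel([[]]): A returns 0, B raises IndexError; on findparallel([[[5]]]): A returns 0, B raises IndexError
import Mathlib
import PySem

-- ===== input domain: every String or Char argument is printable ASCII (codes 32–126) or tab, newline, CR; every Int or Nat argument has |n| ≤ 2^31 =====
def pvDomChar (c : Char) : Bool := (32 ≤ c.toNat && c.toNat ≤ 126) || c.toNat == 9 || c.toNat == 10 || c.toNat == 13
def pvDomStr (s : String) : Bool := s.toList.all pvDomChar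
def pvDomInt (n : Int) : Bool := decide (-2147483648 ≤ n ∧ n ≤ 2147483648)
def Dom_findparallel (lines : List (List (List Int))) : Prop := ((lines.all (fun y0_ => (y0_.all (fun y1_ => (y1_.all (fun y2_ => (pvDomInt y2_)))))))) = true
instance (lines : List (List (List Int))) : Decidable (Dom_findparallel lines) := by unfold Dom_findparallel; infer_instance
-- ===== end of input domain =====

-- B replaces A's double loop over index pairs by a single counting pass over a dict of
-- angle multiplicities, returning sum c*(c-1) over the counts (objective: faster).

-- ===== PORT A =====
-- lines[i][0][1]; the pyGetD defaults are never reached on inputs satisfying Pre_findparallel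
def pvAngleAt (lines : List (List (List Int))) (i : Int) : Int :=
  PySem.List.pyGetD (PySem.List.pyGetD (PySem.List.pyGetD lines i []) 0 []) 1 0

def findparallel (lines : List (List (List Int))) : Int :=
  let n : Int := (lines.length : Int)
  let lines1 : List (Int × Int) :=
    (PySem.List.pyRange 0 n 1).foldl (fun acc i =>
      (PySem.List.pyRange 0 n 1).foldl (fun acc j =>
        if i = j then acc
        else if (pvAngleAt lines i - pvAngleAt lines j).natAbs = 0 then acc ++ [(i, j)]
        else acc) acc) []
  (lines1.length : Int)

-- ===== PORT B =====
-- line[0][1]; the pyGetD defaults are never reached on inputs satisfying Pre_findparallel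
def pvAngle (line : List (List Int)) : Int :=
  PySem.List.pyGetD (PySem.List.pyGetD line 0 []) 1 0

def findparallel_alt (lines : List (List (List Int))) : Int :=
  let counts : PySem.Dict Int Int :=
    lines.foldl (fun d line => d.insert (pvAngle line) (d.getD (pvAngle line) 0 + 1))
      PySem.Dict.empty
  (counts.values.map (fun c => c * (c - 1))).sum

-- ===== PRECONDITION & SPEC =====
-- Pre_ excludes lines whose first segment lacks a second coordinate: there Python A raises
-- IndexError whenever len(lines) >= 2, and on the remaining degenerate inputs (len(lines) <= 1)
-- A returns 0 while B itself raises IndexError, so those inputs cannot be matched.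
def Pre_findparallel (lines : List (List (List Int))) : Prop :=
  ∀ l ∈ lines, l ≠ [] ∧ 2 ≤ (l.headD []).length
instance (lines : List (List (List Int))) : Decidable (Pre_findparallel lines) := by
  unfold Pre_findparallel; infer_instance

def pvWitness_findparallel : List (List (List Int)) := [[[0, 1]], [[2, 1]], [[3, 2]]]

def Spec_findparallel (lines : List (List (List Int))) (out : Int) : Prop := out = findparallel_alt lines
instance (lines : List (List (List Int))) (out : Int) : Decidable (Spec_findparallel lines out) := by unfold Spec_findparallel; infer_instance

-- ===== CLAIM (what is proved, stated in full; the proofs are below) =====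
def Claim_equal_findparallel : Prop := ∀ (lines : List (List (List Int))), Dom_findparallel lines → Pre_findparallel lines → Spec_findparallel lines (findparallel lines)

-- ===== LEMMAS AND PROOFS =====

-- the list of angles both programs count over
def pvAngles (lines : List (List (List Int))) : List Int := lines.map pvAngle

-- dropping the self-index from a count over a duplicate-free index list
lemma countP_ne_self (r : List Int) (hnd : r.Nodup) (i : Int) (hi : i ∈ r)
    (Q : Int → Bool) (hQ : Q i = true) :
    r.countP (fun j => decide (j ≠ i) && Q j) = r.countP Q - 1 := by
  induction r with
  | nil => cases hi
  | cons x r ih =>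
    rcases List.nodup_cons.mp hnd with ⟨hx, hnd'⟩
    rcases List.mem_cons.mp hi with h | h
    · subst h
      have hcongr : List.countP (fun j => !decide (j = i) && Q j) r = r.countP Q := by
        apply List.countP_congr
        intro j hj
        have hne : j ≠ i := fun e => hx (e ▸ hj)
        simp [hne]
      simp [hQ, hcongr]
    · have hxi : x ≠ i := fun e => hx (e ▸ h)
      have hpos : 0 < r.countP Q := List.countP_pos_iff.mpr ⟨i, h, hQ⟩
      rw [List.countP_cons, List.countP_cons, ih hnd' h]
      by_cases hq : Q x = true <;> (simp [hq, hxi]; try omega)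

-- A's pair list has length  sum over angles of (count - 1)
lemma A_eq (lines : List (List (List Int))) :
    findparallel lines =
      (((pvAngles lines).map (fun x => ((pvAngles lines).count x : Int) - 1)).sum) := by
  unfold findparallel
  dsimp only
  set r := PySem.List.pyRange 0 (lines.length : Int) 1 with hr
  have hmapr : r.map (fun j => PySem.List.pyGetD lines j []) = lines :=
    PySem.List.map_pyGetD_pyRange_zero' lines []
  have hnd : r.Nodup := PySem.List.nodup_pyRange_one 0 _
  set p : Int → Int → Bool := fun i j => decide (j ≠ i) &&
      decide (pvAngleAt lines j = pvAngleAt lines i) with hp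
  -- the inner loop is a conditional append
  have hinner : ∀ (i : Int) (acc : List (Int × Int)),
      (r.foldl (fun acc j =>
        if i = j then acc
        else if (pvAngleAt lines i - pvAngleAt lines j).natAbs = 0 then acc ++ [(i, j)]
        else acc) acc)
      = acc ++ ((r.filter (p i)).map (fun j => (i, j))) := by
    intro i acc
    rw [← PySem.List.foldl_append_if (p i) (fun j => (i, j)) r acc]
    apply PySem.List.foldl_congr_mem
    intro acc' j _
    by_cases h1 : i = j
    · simp [hp, h1]
    · have h1' : j ≠ i := fun e => h1 e.symm
      by_cases h2 : pvAngleAt lines i = pvAngleAt lines j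
      · simp [hp, h1, h1', h2.symm]
      · have hs : pvAngleAt lines i - pvAngleAt lines j ≠ 0 := sub_ne_zero_of_ne h2
        have h2' : pvAngleAt lines j ≠ pvAngleAt lines i := fun e => h2 e.symm
        simp [hp, h1, h2', Int.natAbs_eq_zero, hs]
  -- the whole pair list
  have houter : (r.foldl (fun acc i =>
      r.foldl (fun acc j =>
        if i = j then acc
        else if (pvAngleAt lines i - pvAngleAt lines j).natAbs = 0 then acc ++ [(i, j)]
        else acc) acc) ([] : List (Int × Int)))
      = r.flatMap (fun i => (r.filter (p i)).map (fun j => (i, j))) := by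
    rw [PySem.List.foldl_congr_mem r _
      (fun acc i => acc ++ ((r.filter (p i)).map (fun j => (i, j)))) []
      (fun acc i _ => hinner i acc)]
    rw [PySem.List.foldl_append_eq_flatMap, List.nil_append]
  rw [houter, List.length_flatMap]
  -- the count contributed by each index i
  have hterm : ∀ i ∈ r, ((r.filter (p i)).map (fun j => (i, j))).length
      = (pvAngles lines).count (pvAngleAt lines i) - 1 := by
    intro i hi
    rw [List.length_map, ← List.countP_eq_length_filter]
    rw [hp]
    rw [countP_ne_self r hnd i hi _ (by simp)]
    congr 1
    have hcm : List.countP (fun j => decide (pvAngleAt lines j = pvAngleAt lines i)) r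
        = List.countP (fun a => decide (a = pvAngleAt lines i)) (r.map (fun j => pvAngleAt lines j)) := by
      rw [List.countP_map]; rfl
    rw [hcm]
    have hang : r.map (fun j => pvAngleAt lines j) = pvAngles lines := by
      have hcomp : (fun j => pvAngleAt lines j)
          = (fun ln => pvAngle ln) ∘ (fun j => PySem.List.pyGetD lines j []) := rfl
      rw [hcomp, ← List.map_map, hmapr]; rfl
    rw [hang, List.count_eq_countP]
    apply List.countP_congr
    intro a _
    simp [beq_iff_eq]
  rw [List.map_congr_left hterm]
  -- the i-sum is a sum over the angles list
  have hmap2 : r.map (fun i => (pvAngles lines).count (pvAngleAt lines i) - 1)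
      = (pvAngles lines).map (fun a => (pvAngles lines).count a - 1) := by
    have h1 : (fun i => (pvAngles lines).count (pvAngleAt lines i) - 1)
        = ((fun a => (pvAngles lines).count a - 1) ∘ pvAngle) ∘ (fun j => PySem.List.pyGetD lines j []) := rfl
    rw [h1, ← List.map_map, ← List.map_map, hmapr]
    unfold pvAngles; rw [List.map_map]
  rw [hmap2]
  -- cast the Nat sum to Int
  rw [Nat.cast_list_sum, List.map_map]
  apply congrArg
  apply List.map_congr_left
  intro a ha
  have hca : 0 < (pvAngles lines).count a := List.count_pos_iff.mpr ha
  simp only [Function.comp]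
  omega

-- B is  sum over distinct angles of count * (count - 1)
lemma B_eq (lines : List (List (List Int))) :
    findparallel_alt lines =
      ((PySem.List.dedup (pvAngles lines)).map
        (fun a => ((pvAngles lines).count a : Int) * ((pvAngles lines).count a - 1))).sum := by
  unfold findparallel_alt pvAngles
  have h : lines.foldl (fun d line => d.insert (pvAngle line) (d.getD (pvAngle line) 0 + 1))
      (PySem.Dict.empty : PySem.Dict Int Int)
      = PySem.Dict.counter (lines.map pvAngle) := by
    rw [← PySem.Dict.foldl_insert_getD_add_one_eq_counter, List.foldl_map]
  rw [h]
  simp only [PySem.Dict.values, PySem.Dict.items_counter, List.map_map]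
  simp only [PySem.List.dedup_eq_ofList, Function.comp_def]

-- double counting: each distinct value a contributes (count a) copies of (count a - 1)
lemma common_eq (l : List Int) :
    (l.map (fun x => ((l.count x : Int)) - 1)).sum =
      ((PySem.List.dedup l).map (fun a => ((l.count a : Int)) * ((l.count a : Int) - 1))).sum := by
  rw [Finset.sum_list_map_count]
  have hnd := PySem.List.nodup_dedup l
  rw [← List.sum_toFinset _ hnd]
  have hfs : (PySem.List.dedup l).toFinset = l.toFinset := by
    ext x; simp
  rw [hfs]
  exact Finset.sum_congr rfl (fun m _ => by push_cast [nsmul_eq_mul]; ring)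

-- ===== VERDICT (by name: the statement is the Claim_ definition above) =====
theorem findparallel_spec : Claim_equal_findparallel := by
  intro lines _ _
  unfold Spec_findparallel
  rw [A_eq, B_eq, common_eq]
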